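-- pv_equiv track=rewrite | github.com/AmeyMedewar/python_lab | dfa.py | q0
-- ===== SOURCE A (Python) =====
-- def q0(text):#b
--     if text[0] =='b':
--         if len(text) ==1:
--             return True
--         else:
--             return q0(text[1:])
--     elif text[0] =='a':
--         if len(text) ==1:
--             return False
--         else:
--             return q1(text[1:])
--     else:
--         return False
--
-- def q1(text):#a
--     if text[0] =='a':
--         if len(text) ==1:
--             return False
--         else:
--             return q1(text[1:])
--     elif text[0] =='b':
--         if len(text) ==1:
--             return True
--         else:
--             return q0(text[1:])
--     else:
--         return False
-- ===== SOURCE B (Python) =====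
-- def q0(text):
--     return all(c == 'a' or c == 'b' for c in text) and text[-1] == 'b'
-- ===== Notes on version B (the rewrite author's own statement) =====
-- stated objective: simpler
-- what changed: Replaces the mutually recursive two-state DFA simulation with a single closed-form predicate: every character is 'a' or 'b' and the last character is 'b'.
import Mathlib
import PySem

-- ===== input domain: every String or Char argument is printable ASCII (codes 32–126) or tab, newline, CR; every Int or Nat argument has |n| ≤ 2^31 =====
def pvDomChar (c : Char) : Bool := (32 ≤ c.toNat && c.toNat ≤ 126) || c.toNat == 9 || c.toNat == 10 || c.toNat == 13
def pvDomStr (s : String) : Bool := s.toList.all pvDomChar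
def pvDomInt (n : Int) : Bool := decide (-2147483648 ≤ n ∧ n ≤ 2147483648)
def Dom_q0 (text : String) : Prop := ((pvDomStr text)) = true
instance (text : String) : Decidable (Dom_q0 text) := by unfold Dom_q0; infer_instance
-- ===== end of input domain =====

-- B replaces A's mutually recursive two-state DFA simulation with a closed-form
-- predicate: all characters are 'a' or 'b' and the last one is 'b' (objective: simpler).

-- ===== PORT A =====
-- A recurses on text[1:]; ported as mutual structural recursion on the character list.
mutual
def q0A : List Char → Bool
  | [] => false        -- unreachable: Python's text[0] raises IndexError here (excluded by Pre_q0)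
  | c :: rest =>
    if c = 'b' then (if rest = [] then true else q0A rest)
    else if c = 'a' then (if rest = [] then false else q1A rest)
    else false
def q1A : List Char → Bool
  | [] => false        -- unreachable: IndexError in Python (excluded by Pre_q0)
  | c :: rest =>
    if c = 'a' then (if rest = [] then false else q1A rest)
    else if c = 'b' then (if rest = [] then true else q0A rest)
    else false
end

def q0 (text : String) : Bool := q0A text.toList

-- ===== PORT B =====
def q0_alt (text : String) : Bool :=
  text.toList.all (fun c => c == 'a' || c == 'b') &&
    (PySem.List.pyGet? text.toList (-1) == some 'b')   -- text[-1] == 'b'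

-- ===== PRECONDITION & SPEC =====
-- A evaluates text[0] (IndexError on the empty string), so Pre_ excludes "".
def Pre_q0 (text : String) : Prop := text ≠ ""
instance (text : String) : Decidable (Pre_q0 text) := by unfold Pre_q0; infer_instance
def pvWitness_q0 : String := "abb"

def Spec_q0 (text : String) (out : Bool) : Prop := out = q0_alt text
instance (text : String) (out : Bool) : Decidable (Spec_q0 text out) := by unfold Spec_q0; infer_instance

-- ===== CLAIM (what is proved, stated in full; the proofs are below) =====
def Claim_equal_q0 : Prop := ∀ (text : String), Dom_q0 text → Pre_q0 text → Spec_q0 text (q0 text)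

-- ===== LEMMAS AND PROOFS =====
lemma q0A_cons (c : Char) (rest : List Char) :
    q0A (c :: rest) = (if c = 'b' then (if rest = [] then true else q0A rest)
      else if c = 'a' then (if rest = [] then false else q1A rest) else false) := by
  rw [q0A]

lemma q1A_cons (c : Char) (rest : List Char) :
    q1A (c :: rest) = (if c = 'a' then (if rest = [] then false else q1A rest)
      else if c = 'b' then (if rest = [] then true else q0A rest) else false) := by
  rw [q1A]

lemma q0A_q1A_spec : ∀ (l : List Char), l ≠ [] →
    q0A l = (l.all (fun c => c == 'a' || c == 'b') && (l.getLast? == some 'b')) ∧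
    q1A l = (l.all (fun c => c == 'a' || c == 'b') && (l.getLast? == some 'b')) := by
  intro l
  induction l with
  | nil => intro h; exact absurd rfl h
  | cons c rest ih =>
    intro _
    cases rest with
    | nil =>
      refine ⟨?_, ?_⟩ <;>
      · first | rw [q0A_cons] | rw [q1A_cons]
        by_cases hb : c = 'b' <;> by_cases ha : c = 'a' <;> simp_all
    | cons d t =>
      have ihr := ih (by simp)
      have hlast : (c :: d :: t).getLast? = (d :: t).getLast? := by
        simp [List.getLast?_cons_cons]
      refine ⟨?_, ?_⟩ <;>
      · first | rw [q0A_cons] | rw [q1A_cons]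
        simp only [List.all_cons, hlast, if_neg (by simp : ¬ (d :: t) = []), ihr.1, ihr.2]
        by_cases hb : c = 'b' <;> by_cases ha : c = 'a' <;> simp_all [Bool.and_assoc]

lemma toList_ne_nil (text : String) (h : text ≠ "") : text.toList ≠ [] := by
  intro hl
  exact h (String.toList_inj.mp (by simpa using hl))

-- ===== VERDICT (by name: the statement is the Claim_ definition above) =====
theorem q0_spec : Claim_equal_q0 := by
  intro text _ hpre
  unfold Spec_q0 q0 q0_alt
  rw [PySem.List.pyGet?_neg_one]
  exact (q0A_q1A_spec text.toList (toList_ne_nil text hpre)).1
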